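-- pv_equiv track=rewrite | github.com/chellmuth/fem | helper.py | internal_nodes
-- ===== SOURCE A (Python) =====
-- def internal_nodes(dim):
--     indices = []
--
--     original_dim = dim + 2
--     for row in range(dim):
--         for col in range(dim):
--             indices.append(
--                 original_dim
--                 + original_dim * row
--                 + 1
--                 + col
--             )
--
--     return indices
-- ===== SOURCE B (Python) =====
-- def internal_nodes(dim):
--     if dim <= 0:
--         return []
--     side = dim + 2
--     indices = []
--     for n in range(side * side):
--         row, col = divmod(n, side)
--         if 1 <= row <= dim and 1 <= col <= dim:
--             indices.append(n)
--     return indices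
-- ===== Notes on version B (the rewrite author's own statement) =====
-- stated objective: alternative
-- what changed: Replaces the closed-form nested row/col loops that compute each interior index arithmetically with a single enumerate-and-filter pass over all (dim+2)^2 nodes of the padded grid, keeping n exactly when divmod(n, dim+2) lands strictly inside the border.
import Mathlib
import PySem

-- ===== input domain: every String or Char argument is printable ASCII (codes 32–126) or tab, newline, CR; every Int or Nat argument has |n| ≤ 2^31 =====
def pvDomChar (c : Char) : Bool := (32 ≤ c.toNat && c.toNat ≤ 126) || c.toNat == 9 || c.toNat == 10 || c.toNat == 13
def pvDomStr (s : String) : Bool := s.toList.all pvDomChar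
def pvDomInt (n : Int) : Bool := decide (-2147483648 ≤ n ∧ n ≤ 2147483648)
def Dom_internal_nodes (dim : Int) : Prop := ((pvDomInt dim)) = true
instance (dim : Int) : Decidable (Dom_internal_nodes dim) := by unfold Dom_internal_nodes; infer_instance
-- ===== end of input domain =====

-- B replaces A's closed-form nested row/col loops by one enumerate-and-filter pass
-- over all (dim+2)^2 nodes of the padded grid (objective: alternative algorithm, same cost).


-- ===== PORT A =====
def internal_nodes (dim : Int) : List Int :=
  let original_dim := dim + 2
  (PySem.List.pyRange 0 dim 1).foldl (fun indices row =>
    (PySem.List.pyRange 0 dim 1).foldl (fun indices col =>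
      indices ++ [original_dim + original_dim * row + 1 + col]) indices) []

-- ===== PORT B =====
def internal_nodes_alt (dim : Int) : List Int :=
  if dim ≤ 0 then [] else
  let side := dim + 2
  (PySem.List.pyRange 0 (side * side) 1).foldl (fun indices n =>
    let row := PySem.Int.floordiv n side
    let col := PySem.Int.mod n side
    if 1 ≤ row ∧ row ≤ dim ∧ 1 ≤ col ∧ col ≤ dim then indices ++ [n] else indices) []

-- ===== PRECONDITION & SPEC =====
def Spec_internal_nodes (dim : Int) (out : List Int) : Prop := out = internal_nodes_alt dim
instance (dim : Int) (out : List Int) : Decidable (Spec_internal_nodes dim out) := by unfold Spec_internal_nodes; infer_instance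

-- ===== CLAIM (what is proved, stated in full; the proofs are below) =====
def Claim_equal_internal_nodes : Prop := ∀ (dim : Int), Dom_internal_nodes dim → Spec_internal_nodes dim (internal_nodes dim)

-- ===== LEMMAS AND PROOFS =====

-- foldl_append_if with a decidable Prop condition
theorem pv_foldl_append_if {α β : Type} (p : α → Prop) [DecidablePred p] (f : α → β)
    (l : List α) (acc : List β) :
    l.foldl (fun acc x => if p x then acc ++ [f x] else acc) acc
      = acc ++ (l.filter (fun x => decide (p x))).map f := by
  rw [show (fun (acc : List β) (x : α) => if p x then acc ++ [f x] else acc)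
        = (fun acc x => if (fun x => decide (p x)) x = true then acc ++ [f x] else acc) from by
      funext a x; simp]
  exact PySem.List.foldl_append_if _ f l acc

theorem pv_flatMap_congr {α β : Type} {l : List α} {f g : α → List β}
    (h : ∀ x ∈ l, f x = g x) : l.flatMap f = l.flatMap g := by
  induction l with
  | nil => rfl
  | cons a t ih =>
      simp only [List.flatMap_cons, h a (by simp),
        ih (fun x hx => h x (by simp [hx]))]

-- map (C + ·) of range(0,d) is range(C, C+d)
theorem pv_map_add_pyRange (C d : Int) :
    (PySem.List.pyRange 0 d).map (fun c => C + c) = PySem.List.pyRange C (C + d) := by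
  simp only [PySem.List.pyRange_one, List.map_map]
  rw [show C + d - C = d - 0 by ring]
  congr 1
  funext k; simp

-- range(0, m*k) split into k consecutive blocks of width m
theorem pv_range_blocks (m : Int) (hm : 0 < m) : ∀ k : Nat,
    PySem.List.pyRange 0 (m * k)
      = (PySem.List.pyRange 0 k).flatMap (fun r => PySem.List.pyRange (m * r) (m * r + m)) := by
  intro k
  induction k with
  | zero => simp [PySem.List.pyRange_one_eq_nil]
  | succ k ih =>
      have h1 : PySem.List.pyRange 0 (m * ((k : Int) + 1))
          = PySem.List.pyRange 0 (m * k) ++ PySem.List.pyRange (m * k) (m * k + m) := by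
        rw [show m * ((k : Int) + 1) = m * k + m by ring]
        exact PySem.List.pyRange_one_append 0 (m * k) (m * k + m)
          (by positivity) (by omega)
      have h2 : PySem.List.pyRange 0 ((k : Int) + 1)
          = PySem.List.pyRange 0 k ++ [(k : Int)] :=
        PySem.List.pyRange_one_succ_right (by positivity)
      push_cast
      rw [h1, h2, List.flatMap_append, ih]
      simp

-- the filter over one block of width m = dim+2
theorem pv_block_filter (dim r : Int) :
    ((PySem.List.pyRange ((dim + 2) * r) ((dim + 2) * r + (dim + 2))).filter
        (fun n => decide (1 ≤ PySem.Int.floordiv n (dim + 2) ∧ PySem.Int.floordiv n (dim + 2) ≤ dim ∧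
            1 ≤ PySem.Int.mod n (dim + 2) ∧ PySem.Int.mod n (dim + 2) ≤ dim)))
      = if 1 ≤ r ∧ r ≤ dim then PySem.List.pyRange ((dim + 2) * r + 1) ((dim + 2) * r + 1 + dim) else [] := by
  by_cases hdim : 1 ≤ dim
  · set m : Int := dim + 2 with hm
    have hmpos : 0 < m := by omega
    have hcongr : ∀ n ∈ PySem.List.pyRange (m * r) (m * r + m),
        (decide (1 ≤ PySem.Int.floordiv n m ∧ PySem.Int.floordiv n m ≤ dim ∧
            1 ≤ PySem.Int.mod n m ∧ PySem.Int.mod n m ≤ dim))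
          = decide (1 ≤ r ∧ r ≤ dim ∧ m * r + 1 ≤ n ∧ n ≤ m * r + dim) := by
      intro n hn
      rw [PySem.List.mem_pyRange_one] at hn
      have hfd : PySem.Int.floordiv n m = r := by
        rw [PySem.Int.floordiv_eq_iff_of_pos hmpos]
        constructor
        · rw [mul_comm]; exact hn.1
        · rw [show (r + 1) * m = m * r + m by ring]; exact hn.2
      have hmd : PySem.Int.mod n m = n - m * r := by
        have h := PySem.Int.floordiv_mul_add_mod n m
        rw [hfd, mul_comm r m] at h; omega
      rw [hfd, hmd]
      simp only [decide_eq_decide]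
      omega
    rw [List.filter_congr hcongr]
    by_cases hc : 1 ≤ r ∧ r ≤ dim
    · rw [if_pos hc]
      have hsplit : PySem.List.pyRange (m * r) (m * r + m)
          = [m * r] ++ PySem.List.pyRange (m * r + 1) (m * r + 1 + dim) ++ [m * r + 1 + dim] := by
        rw [show m * r + m = (m * r + 1 + dim) + 1 by omega,
          PySem.List.pyRange_one_succ_right (by omega),
          PySem.List.pyRange_one_append (m * r) (m * r + 1) (m * r + 1 + dim) (by omega) (by omega),
          PySem.List.pyRange_one_singleton]
      have hmid : ∀ x ∈ PySem.List.pyRange (m * r + 1) (m * r + 1 + dim),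
          (decide (1 ≤ r ∧ r ≤ dim ∧ m * r + 1 ≤ x ∧ x ≤ m * r + dim)) = true := by
        intro x hx
        rw [PySem.List.mem_pyRange_one] at hx
        simp only [decide_eq_true_eq]; omega
      have h1 : (List.filter (fun n => decide (1 ≤ r ∧ r ≤ dim ∧ m * r + 1 ≤ n ∧ n ≤ m * r + dim)) [m * r]) = [] := by
        simp only [List.filter_cons, List.filter_nil, decide_eq_true_eq]
        rw [if_neg (by omega)]
      have h2 : (List.filter (fun n => decide (1 ≤ r ∧ r ≤ dim ∧ m * r + 1 ≤ n ∧ n ≤ m * r + dim)) [m * r + 1 + dim]) = [] := by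
        simp only [List.filter_cons, List.filter_nil, decide_eq_true_eq]
        rw [if_neg (by omega)]
      rw [hsplit, List.filter_append, List.filter_append, h1, h2,
        List.filter_eq_self.mpr hmid]
      simp
    · rw [if_neg hc]
      rw [List.filter_eq_nil_iff]
      intro n _
      simp only [decide_eq_true_eq]
      omega
  · rw [if_neg (by omega)]
    rw [List.filter_eq_nil_iff]
    intro n hn
    rw [PySem.List.mem_pyRange_one] at hn
    simp only [decide_eq_true_eq]
    intro h
    have h1 := PySem.Int.floordiv_mul_add_mod n (dim + 2)
    omega

theorem pv_main (dim : Int) : internal_nodes dim = internal_nodes_alt dim := by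
  unfold internal_nodes internal_nodes_alt
  by_cases hdim : 1 ≤ dim
  · rw [if_neg (by omega)]
    simp only [PySem.List.foldl_append_singleton_eq_map, pv_foldl_append_if,
      PySem.List.foldl_append_eq_flatMap, List.map_id_fun', id, List.nil_append]
    -- rewrite B's range bound so the block decomposition applies
    have hcast : (((dim + 2).toNat : Int)) = dim + 2 := by omega
    rw [show (dim + 2) * (dim + 2) = (dim + 2) * (((dim + 2).toNat : Int)) by rw [hcast],
      pv_range_blocks (dim + 2) (by omega) (dim + 2).toNat, List.filter_flatMap,
      pv_flatMap_congr (fun r _ => pv_block_filter dim r), hcast]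
    have hs0 : PySem.List.pyRange 0 1 = [(0 : Int)] := by decide
    have hsplit : PySem.List.pyRange 0 (dim + 2)
        = [(0 : Int)] ++ PySem.List.pyRange 1 (dim + 1) ++ [dim + 1] := by
      rw [show dim + 2 = (dim + 1) + 1 by ring,
        PySem.List.pyRange_one_succ_right (by omega),
        PySem.List.pyRange_one_append 0 1 (dim + 1) (by omega) (by omega), hs0]
    rw [hsplit, List.flatMap_append, List.flatMap_append]
    simp only [List.flatMap_cons, List.flatMap_nil]
    rw [if_neg (by omega), if_neg (by omega)]
    rw [pv_flatMap_congr (l := PySem.List.pyRange 1 (dim + 1))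
      (g := fun r => PySem.List.pyRange ((dim + 2) * r + 1) ((dim + 2) * r + 1 + dim))
      (by
        intro r hr
        rw [PySem.List.mem_pyRange_one] at hr
        rw [if_pos (by omega)])]
    simp only [pv_map_add_pyRange]
    rw [PySem.List.pyRange_one 0 dim, PySem.List.pyRange_one 1 (dim + 1),
      List.flatMap_map, List.flatMap_map,
      show (dim - 0).toNat = (dim + 1 - 1).toNat by norm_num]
    simp only [List.append_nil, List.nil_append]
    apply pv_flatMap_congr
    intro k _
    congr 1 <;> ring
  · -- dim ≤ 0: A iterates an empty range; B returns [] at once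
    rw [if_pos (by omega), PySem.List.pyRange_one_eq_nil (by omega : dim ≤ 0)]
    simp

-- ===== VERDICT (by name: the statement is the Claim_ definition above) =====
theorem internal_nodes_spec : Claim_equal_internal_nodes := by
  intro dim _
  unfold Spec_internal_nodes
  exact pv_main dim
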